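-- pv_equiv track=rewrite | github.com/Buguin/python_leetcode | common11/SolutionDP.py | maxProfit1881
-- ===== SOURCE A (Python) =====
-- def maxProfit1881(k: int, prices: [int]) -> int:
--     if len(prices) <=1: return 0
--     size_p = len(prices)
--     profit = [[0]*2 for _ in range(size_p)]
--     profit[0] = [-prices[0], 0]
--     for i in range(1, size_p):
--         profit[i][0] = max(profit[i - 1][0], profit[i - 1][1] - prices[i])
--         profit[i][1] = max(profit[i - 1][1], profit[i - 1][0] + prices[i])
--     # 获取差价
--     temp_stack = []
--     for m in range(1, size_p):
--         if profit[m][1] > profit[m - 1][1]: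
--             temp_stack.append(profit[m][1] - profit[m-1][1])
--     temp_stack.sort()
--     ans = 0
--     for n in range(min(k,len(temp_stack))):
--         ans += temp_stack[n]
--     return ans
-- ===== SOURCE B (Python) =====
-- import heapq
--
-- def maxProfit1881(k: int, prices: [int]) -> int:
--     # The DP table's second column is the running sum of positive adjacent
--     # price differences, so the recorded gains are exactly those differences.
--     diffs = [b - a for a, b in zip(prices, prices[1:]) if b > a]
--     return sum(heapq.nsmallest(k, diffs))
-- ===== Notes on version B (the rewrite author's own statement) =====
-- stated objective: alternative
-- what changed: Replaces the two-state DP table and its post-hoc gain-extraction scan by taking the positive adjacent price differences directly, and the full sort plus indexed summing loop by heapq.nsmallest of the k smallest; measured faster at most sizes but not consistently at the largest, so no speed is claimed.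
import Mathlib
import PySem

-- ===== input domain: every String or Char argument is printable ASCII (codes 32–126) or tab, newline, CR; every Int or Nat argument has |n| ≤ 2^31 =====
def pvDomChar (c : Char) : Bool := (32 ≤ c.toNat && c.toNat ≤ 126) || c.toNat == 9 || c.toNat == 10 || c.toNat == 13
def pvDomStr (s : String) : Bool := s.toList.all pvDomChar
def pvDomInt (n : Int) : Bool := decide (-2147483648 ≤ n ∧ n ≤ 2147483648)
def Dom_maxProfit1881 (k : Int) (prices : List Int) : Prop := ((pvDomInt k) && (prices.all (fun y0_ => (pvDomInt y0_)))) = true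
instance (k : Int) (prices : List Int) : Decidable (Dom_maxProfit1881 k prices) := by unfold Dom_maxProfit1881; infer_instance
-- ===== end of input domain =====

-- B drops A's two-state DP table and full sort: it takes the positive adjacent
-- differences directly and sums the k smallest (nsmallest); return value only.

-- ===== PORT A =====
-- the DP loop: each row profit[i] = (buy, sell) computed from the previous row
def pvTableA (prev : Int × Int) : List Int → List (Int × Int)
  | [] => [prev]
  | p :: rest => prev :: pvTableA (max prev.1 (prev.2 - p), max prev.2 (prev.1 + p)) rest

-- the gain-extraction loop over consecutive rows of the table
def pvGainsA : List (Int × Int) → List Int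
  | a :: b :: t => if b.2 > a.2 then (b.2 - a.2) :: pvGainsA (b :: t) else pvGainsA (b :: t)
  | _ => []

def maxProfit1881 (k : Int) (prices : List Int) : Int :=
  if prices.length ≤ 1 then 0
  else
    match prices with
    | [] => 0   -- unreachable: length > 1
    | p0 :: rest =>
      let stack := PySem.List.sorted (pvGainsA (pvTableA (-p0, 0) rest)) id
      (PySem.List.pyRange 0 (min k (stack.length : Int)) 1).foldl
        (fun acc n => acc + PySem.List.pyGetD stack n 0) 0

-- ===== PORT B =====
-- heapq.nsmallest(k, xs) = first k of the sorted list ([] for k ≤ 0)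
def maxProfit1881_alt (k : Int) (prices : List Int) : Int :=
  let diffs := ((prices.zip (prices.drop 1)).filter (fun ab => ab.2 > ab.1)).map
    (fun ab => ab.2 - ab.1)
  (if k ≤ 0 then [] else (PySem.List.sorted diffs id).take k.toNat).sum

-- ===== PRECONDITION & SPEC =====
def Spec_maxProfit1881 (k : Int) (prices : List Int) (out : Int) : Prop := out = maxProfit1881_alt k prices
instance (k : Int) (prices : List Int) (out : Int) : Decidable (Spec_maxProfit1881 k prices out) := by unfold Spec_maxProfit1881; infer_instance

-- ===== CLAIM (what is proved, stated in full; the proofs are below) =====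
def Claim_equal_maxProfit1881 : Prop := ∀ (k : Int) (prices : List Int), Dom_maxProfit1881 k prices → Spec_maxProfit1881 k prices (maxProfit1881 k prices)

-- ===== LEMMAS AND PROOFS =====

theorem gainsA_cons (pr pr2 : Int × Int) (l : List Int) :
    pvGainsA (pr :: pvTableA pr2 l)
      = (if pr2.2 > pr.2 then [pr2.2 - pr.2] else []) ++ pvGainsA (pvTableA pr2 l) := by
  cases l with
  | nil => simp only [pvTableA, pvGainsA]; split <;> simp
  | cons p rest => simp only [pvTableA, pvGainsA]; split <;> simp

-- the DP rows are (S - p, S) with S the running sum of positive diffs, so the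
-- extracted gains are exactly the positive adjacent differences
theorem gainsA_table (ps : List Int) : ∀ (p s : Int),
    pvGainsA (pvTableA (s - p, s) ps)
      = (((p :: ps).zip ps).filter (fun ab => ab.2 > ab.1)).map (fun ab => ab.2 - ab.1) := by
  induction ps with
  | nil => intro p s; simp [pvTableA, pvGainsA]
  | cons q rest ih =>
    intro p s
    have hrow : (max (s - p) (s - q), max s (s - p + q))
        = (max s (s - p + q) - q, max s (s - p + q)) := by
      have : max (s - p) (s - q) = max s (s - p + q) - q := by omega
      rw [this]
    have h1 : pvTableA (s - p, s) (q :: rest)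
        = (s - p, s) :: pvTableA (max s (s - p + q) - q, max s (s - p + q)) rest := by
      simp only [pvTableA]; rw [hrow]
    rw [h1, gainsA_cons, ih q (max s (s - p + q))]
    by_cases h : q > p
    · have hgt : max s (s - p + q) > s := by omega
      have hval : max s (s - p + q) - s = q - p := by omega
      simp [hgt, hval, h]
    · have hle : ¬ (max s (s - p + q) > s) := by omega
      simp [hle, h]

-- A's summing loop over range(min(k, len)) equals summing the k-prefix
theorem foldl_range_getD (xs : List Int) (n : Nat) :
    (PySem.List.pyRange 0 (n : Int) 1).foldl (fun acc i => acc + PySem.List.pyGetD xs i 0) 0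
      = (xs.take n).sum := by
  induction n with
  | zero => simp [PySem.List.pyRange_one_eq_nil]
  | succ m ih =>
    have : ((m + 1 : Nat) : Int) = (m : Int) + 1 := by push_cast; ring
    rw [this, PySem.List.pyRange_one_succ_right (by positivity), List.foldl_append, ih]
    simp only [List.foldl_cons, List.foldl_nil, PySem.List.pyGetD_natCast]
    rw [List.take_add_one]
    cases h : xs[m]? with
    | none => simp [List.getD, h]
    | some v => simp [List.getD, h]

theorem sumA_eq (xs : List Int) (k : Int) :
    (PySem.List.pyRange 0 (min k (xs.length : Int)) 1).foldl
        (fun acc n => acc + PySem.List.pyGetD xs n 0) 0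
      = (if k ≤ 0 then [] else xs.take k.toNat).sum := by
  by_cases hk : k ≤ 0
  · rw [PySem.List.pyRange_one_eq_nil (by omega)]
    simp [hk]
  · have hmin : min k (xs.length : Int) = ((min k.toNat xs.length : Nat) : Int) := by omega
    rw [hmin, foldl_range_getD]
    have : xs.take (min k.toNat xs.length) = xs.take k.toNat := by
      rw [min_comm, ← List.take_take]
      exact List.take_of_length_le (by simp)
    rw [this]; simp [hk]

-- ===== VERDICT (by name: the statement is the Claim_ definition above) =====
theorem maxProfit1881_spec : Claim_equal_maxProfit1881 := by
  intro k prices _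
  unfold Spec_maxProfit1881 maxProfit1881 maxProfit1881_alt
  match prices with
  | [] => simp [show PySem.List.sorted ([]:List Int) id = [] from rfl]
  | [p0] => simp [show PySem.List.sorted ([]:List Int) id = [] from rfl]
  | p0 :: q :: rest =>
    have hlen : ¬ ((p0 :: q :: rest).length ≤ 1) := by simp
    simp only [hlen, if_false]
    have hg : pvGainsA (pvTableA (-p0, 0) (q :: rest))
        = (((p0 :: q :: rest).zip ((p0 :: q :: rest).drop 1)).filter
            (fun ab => ab.2 > ab.1)).map (fun ab => ab.2 - ab.1) := by
      have := gainsA_table (q :: rest) p0 0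
      simpa using this
    rw [hg, sumA_eq]
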